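-- pv_equiv track=rewrite | github.com/tomamic/fondinfo | exs/c04_letters.py | count_am_nz
-- ===== SOURCE A (Python) =====
-- def count_am_nz(text: str) -> tuple[int, int]:
--     count_am, count_nz = 0, 0
--     for c in text.lower():
--         if "a" <= c <= "m":
--             count_am += 1
--         elif "n" <= c <= "z":
--             count_nz += 1
--     return count_am, count_nz
-- ===== SOURCE B (Python) =====
-- AM_LETTERS = "abcdefghijklm"
-- NZ_LETTERS = "nopqrstuvwxyz"
--
-- def count_am_nz(text: str) -> tuple[int, int]:
--     freq = {}
--     for c in text.lower():
--         freq[c] = freq.get(c, 0) + 1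
--     count_am = sum(freq.get(ch, 0) for ch in AM_LETTERS)
--     count_nz = sum(freq.get(ch, 0) for ch in NZ_LETTERS)
--     return count_am, count_nz
-- ===== Notes on version B (the rewrite author's own statement) =====
-- stated objective: alternative
-- what changed: B builds a frequency table of the lowercased text in one pass and then sums the counts of the 13 fixed letters of each half of the alphabet, instead of A's per-character range-comparison branching.
import Mathlib
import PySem

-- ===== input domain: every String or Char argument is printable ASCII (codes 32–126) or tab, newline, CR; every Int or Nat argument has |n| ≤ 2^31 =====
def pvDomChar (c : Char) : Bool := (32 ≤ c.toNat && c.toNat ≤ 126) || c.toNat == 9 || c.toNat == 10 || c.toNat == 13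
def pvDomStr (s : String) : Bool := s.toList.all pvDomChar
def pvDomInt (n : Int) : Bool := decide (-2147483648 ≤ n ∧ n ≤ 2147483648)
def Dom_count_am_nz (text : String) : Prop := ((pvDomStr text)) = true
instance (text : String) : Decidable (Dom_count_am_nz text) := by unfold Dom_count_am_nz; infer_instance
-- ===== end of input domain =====

-- B replaces A's per-character range-comparison scan by one frequency-table pass over the
-- lowercased text followed by summing the table entries of the 13 fixed letters of each
-- half of the alphabet (objective: alternative decomposition, same O(n) cost).


-- ===== PORT A =====
-- loop over text.lower() with an accumulator pair; branches in A's order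
def count_am_nz (text : String) : Int × Int :=
  (PySem.Str.lower text).toList.foldl
    (fun (acc : Int × Int) c =>
      if 'a' ≤ c ∧ c ≤ 'm' then (acc.1 + 1, acc.2)
      else if 'n' ≤ c ∧ c ≤ 'z' then (acc.1, acc.2 + 1)
      else acc)
    (0, 0)

-- ===== PORT B =====
-- the module constants AM_LETTERS / NZ_LETTERS of Source B
def amLetters : List Char := ['a','b','c','d','e','f','g','h','i','j','k','l','m']
def nzLetters : List Char := ['n','o','p','q','r','s','t','u','v','w','x','y','z']

def count_am_nz_alt (text : String) : Int × Int :=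
  let freq : PySem.Dict Char Int :=
    (PySem.Str.lower text).toList.foldl
      (fun d c => d.insert c (d.getD c 0 + 1)) PySem.Dict.empty
  (amLetters.foldl (fun s ch => s + freq.getD ch 0) 0,
   nzLetters.foldl (fun s ch => s + freq.getD ch 0) 0)

-- ===== PRECONDITION & SPEC =====
def Spec_count_am_nz (text : String) (out : Int × Int) : Prop := out = count_am_nz_alt text
instance (text : String) (out : Int × Int) : Decidable (Spec_count_am_nz text out) := by unfold Spec_count_am_nz; infer_instance

-- ===== CLAIM (what is proved, stated in full; the proofs are below) =====
def Claim_equal_count_am_nz : Prop := ∀ (text : String), Dom_count_am_nz text → Spec_count_am_nz text (count_am_nz text)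

-- ===== LEMMAS AND PROOFS =====

theorem char_eq_iff (c d : Char) : (c = d) ↔ c.toNat = d.toNat := by
  constructor
  · rintro rfl; rfl
  · intro h; exact Char.ext (UInt32.toNat_inj.mp h)

theorem char_le_iff (c d : Char) : (c ≤ d) ↔ c.toNat ≤ d.toNat := by
  rw [Char.le_def, UInt32.le_iff_toNat_le]; rfl

-- the am and nz ranges are disjoint
theorem am_nz_disjoint (c : Char) (h1 : 'a' ≤ c ∧ c ≤ 'm') (h2 : 'n' ≤ c ∧ c ≤ 'z') : False := by
  simp only [char_le_iff] at h1 h2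
  have ha : ('m').toNat = 109 := rfl
  have hn : ('n').toNat = 110 := rfl
  omega

-- A's loop computes the two range-counts
theorem loopA (l : List Char) (am nz : Int) :
    l.foldl
      (fun (acc : Int × Int) c =>
        if 'a' ≤ c ∧ c ≤ 'm' then (acc.1 + 1, acc.2)
        else if 'n' ≤ c ∧ c ≤ 'z' then (acc.1, acc.2 + 1)
        else acc)
      (am, nz)
    = (am + l.countP (fun c => decide ('a' ≤ c ∧ c ≤ 'm')),
       nz + l.countP (fun c => decide ('n' ≤ c ∧ c ≤ 'z'))) := by
  induction l generalizing am nz with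
  | nil => simp
  | cons c t ih =>
    by_cases hA : 'a' ≤ c ∧ c ≤ 'm'
    · have hN : ¬ ('n' ≤ c ∧ c ≤ 'z') := fun hN => am_nz_disjoint c hA hN
      simp [List.foldl_cons, hA, hN, ih]
      ring_nf
    · by_cases hN : 'n' ≤ c ∧ c ≤ 'z'
      · simp [List.foldl_cons, hA, hN, ih]
        ring_nf
      · simp [List.foldl_cons, hA, hN, ih]

-- how often an arbitrary character occurs among the 13 am-letters
theorem ind_am (c : Char) :
    (amLetters.countP (· == c) : Int) = if 'a' ≤ c ∧ c ≤ 'm' then 1 else 0 := by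
  by_cases h : 'a' ≤ c ∧ c ≤ 'm'
  · rw [if_pos h]
    obtain ⟨h1, h2⟩ := h
    rw [char_le_iff] at h1 h2
    have ha : ('a').toNat = 97 := rfl
    have hm : ('m').toNat = 109 := rfl
    have hd : c = 'a' ∨ c = 'b' ∨ c = 'c' ∨ c = 'd' ∨ c = 'e' ∨ c = 'f' ∨ c = 'g' ∨
        c = 'h' ∨ c = 'i' ∨ c = 'j' ∨ c = 'k' ∨ c = 'l' ∨ c = 'm' := by
      simp only [char_eq_iff, show ('a').toNat = 97 from rfl, show ('b').toNat = 98 from rfl,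
        show ('c').toNat = 99 from rfl, show ('d').toNat = 100 from rfl,
        show ('e').toNat = 101 from rfl, show ('f').toNat = 102 from rfl,
        show ('g').toNat = 103 from rfl, show ('h').toNat = 104 from rfl,
        show ('i').toNat = 105 from rfl, show ('j').toNat = 106 from rfl,
        show ('k').toNat = 107 from rfl, show ('l').toNat = 108 from rfl,
        show ('m').toNat = 109 from rfl]
      omega
    rcases hd with rfl|rfl|rfl|rfl|rfl|rfl|rfl|rfl|rfl|rfl|rfl|rfl|rfl <;> decide
  · rw [if_neg h]
    have hz : amLetters.countP (· == c) = 0 := by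
      rw [List.countP_eq_zero]
      intro ch hch
      simp only [beq_iff_eq]
      intro he
      apply h
      subst he
      fin_cases hch <;> exact ⟨by decide, by decide⟩
    rw [hz]; rfl

-- how often an arbitrary character occurs among the 13 nz-letters
theorem ind_nz (c : Char) :
    (nzLetters.countP (· == c) : Int) = if 'n' ≤ c ∧ c ≤ 'z' then 1 else 0 := by
  by_cases h : 'n' ≤ c ∧ c ≤ 'z'
  · rw [if_pos h]
    obtain ⟨h1, h2⟩ := h
    rw [char_le_iff] at h1 h2
    have hn : ('n').toNat = 110 := rfl
    have hz : ('z').toNat = 122 := rfl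
    have hd : c = 'n' ∨ c = 'o' ∨ c = 'p' ∨ c = 'q' ∨ c = 'r' ∨ c = 's' ∨ c = 't' ∨
        c = 'u' ∨ c = 'v' ∨ c = 'w' ∨ c = 'x' ∨ c = 'y' ∨ c = 'z' := by
      simp only [char_eq_iff, show ('n').toNat = 110 from rfl, show ('o').toNat = 111 from rfl,
        show ('p').toNat = 112 from rfl, show ('q').toNat = 113 from rfl,
        show ('r').toNat = 114 from rfl, show ('s').toNat = 115 from rfl,
        show ('t').toNat = 116 from rfl, show ('u').toNat = 117 from rfl,
        show ('v').toNat = 118 from rfl, show ('w').toNat = 119 from rfl,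
        show ('x').toNat = 120 from rfl, show ('y').toNat = 121 from rfl,
        show ('z').toNat = 122 from rfl]
      omega
    rcases hd with rfl|rfl|rfl|rfl|rfl|rfl|rfl|rfl|rfl|rfl|rfl|rfl|rfl <;> decide
  · rw [if_neg h]
    have hz : nzLetters.countP (· == c) = 0 := by
      rw [List.countP_eq_zero]
      intro ch hch
      simp only [beq_iff_eq]
      intro he
      apply h
      subst he
      fin_cases hch <;> exact ⟨by decide, by decide⟩
    rw [hz]; rfl

-- summing per-letter counts over a letter list = counting the matching predicate, generic part
theorem sum_counts (letters : List Char) (p : Char → Prop) [DecidablePred p]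
    (hind : ∀ c, (letters.countP (· == c) : Int) = if p c then 1 else 0) (l : List Char) :
    (letters.map (fun ch => (l.count ch : Int))).sum = (l.countP (fun c => decide (p c)) : Int) := by
  induction l with
  | nil => simp [List.count_nil]
  | cons c t ih =>
    have hstep : (letters.map (fun ch => ((c :: t).count ch : Int))).sum
        = (letters.map (fun ch => (t.count ch : Int))).sum
          + (letters.map (fun ch => if ch == c then (1 : Int) else 0)).sum := by
      rw [← PySem.List.sum_map_add_int]
      refine congrArg List.sum (List.map_congr_left ?_)
      intro ch _
      rw [List.count_cons]
      push_cast
      simp only [beq_iff_eq]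
      by_cases h : ch = c
      · simp [h]
      · rw [if_neg (fun hh : c = ch => h hh.symm), if_neg h]
    rw [hstep, ih, PySem.List.sum_map_ite_one_zero, hind c, List.countP_cons]
    by_cases hp : p c <;> simp [hp]

-- ===== VERDICT (by name: the statement is the Claim_ definition above) =====
theorem count_am_nz_spec : Claim_equal_count_am_nz := by
  intro text _
  simp only [Spec_count_am_nz, count_am_nz, count_am_nz_alt]
  rw [loopA]
  have hB : ∀ letters : List Char,
      letters.foldl (fun s ch => s + (((PySem.Str.lower text).toList.foldl
        (fun d c => d.insert c (d.getD c 0 + 1)) PySem.Dict.empty).getD ch 0)) 0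
      = (letters.map (fun ch => (((PySem.Str.lower text).toList.count ch : Int)))).sum := by
    intro letters
    rw [PySem.List.foldl_add]
    simp only [PySem.Dict.getD_foldl_insert_add_one, zero_add]
    simp
  rw [hB amLetters, hB nzLetters,
      sum_counts amLetters (fun c => 'a' ≤ c ∧ c ≤ 'm') ind_am,
      sum_counts nzLetters (fun c => 'n' ≤ c ∧ c ≤ 'z') ind_nz]
  simp
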